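-- pv_equiv track=rewrite | github.com/aszkiel71/uwr | informatyka [computer science]/[24-W] Wstep do pythona/ninth_list/task2.py | znajdz_zagadke_trzy
-- ===== SOURCE A (Python) =====
-- from collections import defaultdict, Counter
--
-- def znajdz_zagadke_trzy(name, words):
--     name = name.lower().replace(" ", "")
--     name_counter = Counter(name)
--
--     word_dict = defaultdict(list)
--     for word in words:
--         key = ''.join(sorted(word))
--         word_dict[key].append(word)
--
--
--     for word1 in words:
--         remaining_letters1 = name_counter - Counter(word1)
--         if not remaining_letters1:
--             continue
--         for word2 in words:
--             if word1 == word2: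
--                 continue
--             remaining_letters2 = remaining_letters1 - Counter(word2)
--             if not remaining_letters2:
--                 continue
--
--             remaining_key = ''.join(sorted(remaining_letters2.elements()))
--             if remaining_key in word_dict:
--                 for word3 in word_dict[remaining_key]:
--                     if Counter(word1 + word2 + word3) == name_counter:
--                         return f"{word1.capitalize()} {word2.capitalize()} {word3.capitalize()}"
--
--     return "No solution"
-- ===== SOURCE B (Python) =====
-- from collections import Counter
--
-- def znajdz_zagadke_trzy(name, words):
--     target = Counter(name.lower().replace(" ", ""))
--     for word1 in words:
--         rem1 = target - Counter(word1)
--         if not rem1: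
--             continue
--         for word2 in words:
--             if word1 == word2 or not rem1 - Counter(word2):
--                 continue
--             for word3 in words:
--                 if Counter(word1 + word2 + word3) == target:
--                     return f"{word1.capitalize()} {word2.capitalize()} {word3.capitalize()}"
--     return "No solution"
-- ===== Notes on version B (the rewrite author's own statement) =====
-- stated objective: simpler
-- what changed: Drops the anagram-key defaultdict index and the remaining-letters key lookup entirely; a plain triple nested loop checks Counter(w1+w2+w3) == target directly for the third word.
import Mathlib
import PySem

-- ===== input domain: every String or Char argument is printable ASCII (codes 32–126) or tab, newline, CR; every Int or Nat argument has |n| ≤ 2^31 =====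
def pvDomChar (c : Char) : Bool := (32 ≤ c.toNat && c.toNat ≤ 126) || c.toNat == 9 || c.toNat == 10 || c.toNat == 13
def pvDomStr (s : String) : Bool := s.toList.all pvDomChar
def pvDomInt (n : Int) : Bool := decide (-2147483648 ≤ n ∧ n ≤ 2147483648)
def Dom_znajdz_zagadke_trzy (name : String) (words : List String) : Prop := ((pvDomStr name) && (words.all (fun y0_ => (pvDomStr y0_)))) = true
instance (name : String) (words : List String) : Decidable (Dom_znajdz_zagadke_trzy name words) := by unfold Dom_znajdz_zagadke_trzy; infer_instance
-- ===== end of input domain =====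

-- B drops A's anagram-key defaultdict index and its remaining-letters lookup; a plain triple nested
-- loop checks the full Counter equality for the third word (simpler, same results; not faster).
-- In both ports, a Counter built from a string is represented exactly by the sorted list of its
-- characters: Counter emptiness, truncated Counter subtraction (List.diff), Counter equality and
-- ''.join(sorted(...)) all correspond exactly under this representation.
-- str.capitalize is ported by hand via PySem.Chars (exact on the ASCII domain).

-- sorted(chars) — Python's sorted on a list of characters
def pvSortC (l : List Char) : List Char := PySem.List.sorted l (fun c => c) false

-- str.capitalize(): first character title-cased, rest lowered (exact on ASCII)
def pvCap (s : String) : String :=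
  match s.toList with
  | [] => s
  | c :: rest => String.ofList (PySem.Chars.upperChar c :: PySem.Chars.lower rest)

-- ===== PORT A =====
-- key = ''.join(sorted(word))
def pvKey (w : String) : String := String.ofList (pvSortC w.toList)

-- word_dict = defaultdict(list); for word in words: word_dict[''.join(sorted(word))].append(word)
def pvDictOf (words : List String) : PySem.Dict String (List String) :=
  words.foldl (fun d w => d.modify (pvKey w) [] (fun l => l ++ [w])) PySem.Dict.empty

-- innermost: for word3 in word_dict[remaining_key]: if Counter(word1+word2+word3) == name_counter: return …
def pvLoop3 (nc : List Char) (w1 w2 : String) : List String → Option String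
  | [] => none
  | w3 :: rest =>
      if pvSortC ((w1 ++ w2 ++ w3).toList) = nc then
        some (pvCap w1 ++ " " ++ pvCap w2 ++ " " ++ pvCap w3)
      else pvLoop3 nc w1 w2 rest

-- middle loop over word2
def pvLoop2 (nc : List Char) (d : PySem.Dict String (List String)) (w1 : String)
    (rem1 : List Char) : List String → Option String
  | [] => none
  | w2 :: rest =>
      if w1 = w2 then pvLoop2 nc d w1 rem1 rest
      else
        let rem2 := rem1.diff (pvSortC w2.toList)
        if rem2 = [] then pvLoop2 nc d w1 rem1 rest
        else
          let key := String.ofList (pvSortC rem2)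
          if d.contains key then
            match pvLoop3 nc w1 w2 (d.getD key []) with
            | some r => some r
            | none => pvLoop2 nc d w1 rem1 rest
          else pvLoop2 nc d w1 rem1 rest

-- outer loop over word1
def pvLoop1 (nc : List Char) (d : PySem.Dict String (List String)) (allWords : List String) :
    List String → Option String
  | [] => none
  | w1 :: rest =>
      let rem1 := nc.diff (pvSortC w1.toList)
      if rem1 = [] then pvLoop1 nc d allWords rest
      else
        match pvLoop2 nc d w1 rem1 allWords with
        | some r => some r
        | none => pvLoop1 nc d allWords rest

def znajdz_zagadke_trzy (name : String) (words : List String) : String :=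
  let nm := PySem.Str.replace (PySem.Str.lower name) " " ""
  let nc := pvSortC nm.toList
  let d := pvDictOf words
  (pvLoop1 nc d words words).getD "No solution"

-- ===== PORT B =====
def znajdz_zagadke_trzy_alt (name : String) (words : List String) : String :=
  let target := pvSortC ((PySem.Str.replace (PySem.Str.lower name) " " "").toList)
  (words.findSome? (fun w1 =>
    let rem1 := target.diff (pvSortC w1.toList)
    if rem1 = [] then none
    else words.findSome? (fun w2 =>
      if w1 = w2 ∨ rem1.diff (pvSortC w2.toList) = [] then none
      else words.findSome? (fun w3 =>
        if pvSortC ((w1 ++ w2 ++ w3).toList) = target then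
          some (pvCap w1 ++ " " ++ pvCap w2 ++ " " ++ pvCap w3)
        else none)))).getD "No solution"

-- ===== PRECONDITION & SPEC =====
def Spec_znajdz_zagadke_trzy (name : String) (words : List String) (out : String) : Prop := out = znajdz_zagadke_trzy_alt name words
instance (name : String) (words : List String) (out : String) : Decidable (Spec_znajdz_zagadke_trzy name words out) := by unfold Spec_znajdz_zagadke_trzy; infer_instance

-- ===== CLAIM (what is proved, stated in full; the proofs are below) =====
def Claim_equal_znajdz_zagadke_trzy : Prop := ∀ (name : String) (words : List String), Dom_znajdz_zagadke_trzy name words → Spec_znajdz_zagadke_trzy name words (znajdz_zagadke_trzy name words)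

-- ===== LEMMAS AND PROOFS =====

-- the third-word check of both programs
def pvHit (nc : List Char) (w1 w2 w3 : String) : Option String :=
  if pvSortC ((w1 ++ w2 ++ w3).toList) = nc then
    some (pvCap w1 ++ " " ++ pvCap w2 ++ " " ++ pvCap w3)
  else none

lemma findSome?_filter {α β : Type} (p : α → Bool) (f : α → Option β) (xs : List α)
    (h : ∀ x ∈ xs, (f x).isSome → p x = true) :
    (xs.filter p).findSome? f = xs.findSome? f := by
  induction xs with
  | nil => rfl
  | cons x xs ih =>
      by_cases hp : p x = true
      · simp [hp, List.findSome?_cons,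
          ih (fun y hy => h y (List.mem_cons_of_mem _ hy))]
      · have hfx : f x = none := by
          cases hfx : f x with
          | none => rfl
          | some v => exact absurd (h x (List.mem_cons_self) (by simp [hfx])) hp
        simp [hp, hfx,
          ih (fun y hy => h y (List.mem_cons_of_mem _ hy))]

lemma pvDictOf_getD (words : List String) (k : String) :
    (pvDictOf words).getD k [] = words.filter (fun w => pvKey w == k) := by
  have h := PySem.Dict.getD_foldl_modify_append
    (words.map (fun w => (pvKey w, w))) (PySem.Dict.empty (κ := String) (ν := List String)) k
  rw [List.foldl_map] at h
  simpa [pvDictOf, List.filter_map, Function.comp_def] using h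

lemma pvDictOf_contains (words : List String) (k : String) :
    (pvDictOf words).contains k = true ↔ ∃ w ∈ words, pvKey w = k := by
  unfold pvDictOf
  rw [PySem.Dict.contains_iff_mem_keys]
  rw [PySem.Dict.keys_foldl_modify_key words pvKey [] (fun _ w l => l ++ [w]) PySem.Dict.empty]
  simp [PySem.Dict.keys_empty, PySem.Set.mem_update, eq_comm]

lemma pvSortC_perm (l : List Char) : (pvSortC l).Perm l :=
  PySem.List.sorted_perm l (fun c => c) false

lemma pvSortC_eq_iff (l m : List Char) : pvSortC l = pvSortC m ↔ l.Perm m :=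
  PySem.List.sorted_id_eq_sorted_id_iff_perm l m

-- a full-cover hit determines the third word's letter multiset: it is exactly the remaining letters
lemma key_of_hit (nc : List Char) (w1 w2 w3 : String)
    (h : pvSortC ((w1 ++ w2 ++ w3).toList) = nc) :
    pvSortC w3.toList = pvSortC ((nc.diff (pvSortC w1.toList)).diff (pvSortC w2.toList)) := by
  rw [pvSortC_eq_iff, ← Multiset.coe_eq_coe]
  have hc : ∀ a : List Char, (↑(pvSortC a) : Multiset Char) = ↑a :=
    fun a => Multiset.coe_eq_coe.mpr (pvSortC_perm a)
  have hnc : (↑nc : Multiset Char) = ↑w1.toList + ↑w2.toList + ↑w3.toList := by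
    rw [← h, hc]
    simp [String.toList_append]
  rw [← Multiset.coe_sub, ← Multiset.coe_sub, hc, hc, hnc,
    tsub_tsub, add_tsub_cancel_left]

lemma pvLoop3_eq_findSome? (nc : List Char) (w1 w2 : String) (l : List String) :
    pvLoop3 nc w1 w2 l = l.findSome? (pvHit nc w1 w2) := by
  induction l with
  | nil => rfl
  | cons w3 rest ih =>
      simp only [pvLoop3, List.findSome?_cons, pvHit]
      split_ifs with hcond <;> simp [ih]

-- A's dict branch (membership test + scan of the bucket) equals B's full scan of words
lemma inner_eq (nc : List Char) (words : List String) (w1 w2 : String) (rem2 : List Char)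
    (hkey : ∀ w3 : String, pvSortC ((w1 ++ w2 ++ w3).toList) = nc →
      pvSortC w3.toList = pvSortC rem2) :
    (if (pvDictOf words).contains (String.ofList (pvSortC rem2)) then
        pvLoop3 nc w1 w2 ((pvDictOf words).getD (String.ofList (pvSortC rem2)) [])
      else none)
      = words.findSome? (pvHit nc w1 w2) := by
  set key := String.ofList (pvSortC rem2) with hkeydef
  have hfilter : (words.filter (fun w => pvKey w == key)).findSome? (pvHit nc w1 w2)
      = words.findSome? (pvHit nc w1 w2) := by
    apply findSome?_filter
    intro w3 _ hsome
    have hhit : pvSortC ((w1 ++ w2 ++ w3).toList) = nc := by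
      simp only [pvHit] at hsome
      by_cases hne : pvSortC ((w1 ++ w2 ++ w3).toList) = nc
      · exact hne
      · rw [if_neg hne] at hsome
        simp at hsome
    have := hkey w3 hhit
    simp [pvKey, hkeydef, this]
  by_cases hcont : (pvDictOf words).contains key = true
  · rw [if_pos hcont, pvDictOf_getD, pvLoop3_eq_findSome?, hfilter]
  · rw [if_neg hcont]
    have hempty : words.filter (fun w => pvKey w == key) = [] := by
      rw [List.filter_eq_nil_iff]
      intro w hw hbeq
      exact hcont ((pvDictOf_contains words key).mpr ⟨w, hw, by simpa using hbeq⟩)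
    rw [← hfilter, hempty]
    rfl

lemma pvLoop2_eq (nc : List Char) (words : List String) (w1 : String) (rem1 : List Char)
    (hrem1 : rem1 = nc.diff (pvSortC w1.toList)) (ws : List String) :
    pvLoop2 nc (pvDictOf words) w1 rem1 ws
      = ws.findSome? (fun w2 =>
          if w1 = w2 ∨ rem1.diff (pvSortC w2.toList) = [] then none
          else words.findSome? (pvHit nc w1 w2)) := by
  induction ws with
  | nil => rfl
  | cons w2 rest ih =>
      by_cases h12 : w1 = w2
      · subst h12
        simp [pvLoop2, ih]
      · by_cases hrem2 : rem1.diff (pvSortC w2.toList) = []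
        · simp [pvLoop2, h12, hrem2, ih]
        · have hor : ¬(w1 = w2 ∨ rem1.diff (pvSortC w2.toList) = []) := by
            simp [h12, hrem2]
          have hkey : ∀ w3 : String, pvSortC ((w1 ++ w2 ++ w3).toList) = nc →
              pvSortC w3.toList = pvSortC (rem1.diff (pvSortC w2.toList)) := by
            intro w3 hhit
            rw [hrem1]
            exact key_of_hit nc w1 w2 w3 hhit
          have hin := inner_eq nc words w1 w2 (rem1.diff (pvSortC w2.toList)) hkey
          simp only [pvLoop2, List.findSome?_cons, if_neg h12, if_neg hrem2, if_neg hor]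
          rw [← hin]
          by_cases hcont : (pvDictOf words).contains
              (String.ofList (pvSortC (rem1.diff (pvSortC w2.toList)))) = true
          · simp only [if_pos hcont]
            cases pvLoop3 nc w1 w2 ((pvDictOf words).getD
                (String.ofList (pvSortC (rem1.diff (pvSortC w2.toList)))) []) with
            | none => simp [ih]
            | some r => simp
          · simp only [if_neg hcont]
            simp [ih]

lemma pvLoop1_eq (nc : List Char) (words : List String) (ws : List String) :
    pvLoop1 nc (pvDictOf words) words ws
      = ws.findSome? (fun w1 =>
          let rem1 := nc.diff (pvSortC w1.toList)
          if rem1 = [] then none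
          else words.findSome? (fun w2 =>
            if w1 = w2 ∨ rem1.diff (pvSortC w2.toList) = [] then none
            else words.findSome? (pvHit nc w1 w2))) := by
  induction ws with
  | nil => rfl
  | cons w1 rest ih =>
      simp only [pvLoop1, List.findSome?_cons]
      by_cases hrem1 : nc.diff (pvSortC w1.toList) = []
      · simp [hrem1, ih]
      · rw [pvLoop2_eq nc words w1 (nc.diff (pvSortC w1.toList)) rfl words]
        simp only [hrem1]
        cases words.findSome? (fun w2 =>
            if w1 = w2 ∨ (nc.diff (pvSortC w1.toList)).diff (pvSortC w2.toList) = [] then none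
            else words.findSome? (pvHit nc w1 w2)) with
        | none => simp [ih]
        | some r => simp

-- ===== VERDICT (by name: the statement is the Claim_ definition above) =====
theorem znajdz_zagadke_trzy_spec : Claim_equal_znajdz_zagadke_trzy := by
  intro name words _
  unfold Spec_znajdz_zagadke_trzy znajdz_zagadke_trzy znajdz_zagadke_trzy_alt
  simp only [pvLoop1_eq]
  rfl
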